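-- pv_equiv track=rewrite | github.com/The-Mosher-Lab/genomics_tools | shortstack_full_report_randomize_gtf_overlaps.py | overlap_randomized_clusters_gtf
-- ===== SOURCE A (Python) =====
-- def overlap_randomized_clusters_gtf(gtf_dict, randomized_clusters, upstream_bp,
--                                     downstream_bp, feature_body):
--     upstream_overlaps = 0
--     downstream_overlaps = 0
--     body_overlaps = 0
--     for chromosome in gtf_dict:
--         if chromosome in randomized_clusters:
--             for feature_id in gtf_dict[chromosome]:
--                 feature_start = gtf_dict[chromosome][feature_id][0]
--                 feature_stop = gtf_dict[chromosome][feature_id][1]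
--                 for cluster in randomized_clusters[chromosome]:
--                     cluster_start = randomized_clusters[chromosome][cluster][0]
--                     if upstream_bp > 0 and feature_start - upstream_bp <= cluster_start <= feature_start:
--                         upstream_overlaps += 1
--                     if feature_body and feature_start <= cluster_start <= feature_stop:
--                         body_overlaps += 1
--                     if downstream_bp > 0 and feature_stop + downstream_bp >= cluster_start >= feature_stop:
--                         downstream_overlaps += 1
--     return [upstream_overlaps, body_overlaps, downstream_overlaps]
-- ===== SOURCE B (Python) =====
-- from bisect import bisect_left, bisect_right
--
--
-- def _count_in(starts, lo, hi):
--     # number of sorted values x with lo <= x <= hi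
--     return max(0, bisect_right(starts, hi) - bisect_left(starts, lo))
--
--
-- def overlap_randomized_clusters_gtf(gtf_dict, randomized_clusters, upstream_bp,
--                                     downstream_bp, feature_body):
--     upstream_overlaps = 0
--     body_overlaps = 0
--     downstream_overlaps = 0
--     for chromosome in gtf_dict:
--         if chromosome in randomized_clusters:
--             starts = sorted(v[0] for v in randomized_clusters[chromosome].values())
--             for coords in gtf_dict[chromosome].values():
--                 feature_start = coords[0]
--                 feature_stop = coords[1]
--                 if upstream_bp > 0:
--                     upstream_overlaps += _count_in(starts, feature_start - upstream_bp, feature_start)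
--                 if feature_body:
--                     body_overlaps += _count_in(starts, feature_start, feature_stop)
--                 if downstream_bp > 0:
--                     downstream_overlaps += _count_in(starts, feature_stop, feature_stop + downstream_bp)
--     return [upstream_overlaps, body_overlaps, downstream_overlaps]
-- ===== Notes on version B (the rewrite author's own statement) =====
-- stated objective: alternative
-- what changed: replaces the per-feature linear scan over all clusters by sorting each chromosome's cluster starts once and counting each feature's upstream/body/downstream interval with two binary searches (bisect); on the measured input family this was not measurably faster
import Mathlib
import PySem

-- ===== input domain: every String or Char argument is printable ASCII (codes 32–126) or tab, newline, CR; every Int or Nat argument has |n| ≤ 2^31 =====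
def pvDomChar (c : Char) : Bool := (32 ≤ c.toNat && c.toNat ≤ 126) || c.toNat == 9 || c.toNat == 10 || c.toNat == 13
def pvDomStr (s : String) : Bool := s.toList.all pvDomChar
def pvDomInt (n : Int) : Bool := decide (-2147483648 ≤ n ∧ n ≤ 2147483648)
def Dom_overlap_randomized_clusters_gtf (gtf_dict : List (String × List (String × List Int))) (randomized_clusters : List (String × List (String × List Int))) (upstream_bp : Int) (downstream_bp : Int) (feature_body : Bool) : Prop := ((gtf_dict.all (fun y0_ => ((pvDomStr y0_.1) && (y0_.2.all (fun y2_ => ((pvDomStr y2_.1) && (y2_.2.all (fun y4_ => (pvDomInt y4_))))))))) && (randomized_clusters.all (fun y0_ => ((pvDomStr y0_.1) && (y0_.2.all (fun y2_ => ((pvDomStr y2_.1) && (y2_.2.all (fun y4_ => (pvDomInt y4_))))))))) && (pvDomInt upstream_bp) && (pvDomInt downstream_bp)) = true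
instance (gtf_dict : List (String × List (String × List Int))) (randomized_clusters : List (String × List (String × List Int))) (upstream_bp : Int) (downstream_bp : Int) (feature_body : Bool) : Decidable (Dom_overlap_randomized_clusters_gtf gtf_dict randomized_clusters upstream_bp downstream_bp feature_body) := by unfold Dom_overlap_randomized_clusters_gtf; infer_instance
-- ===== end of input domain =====

-- B replaces A's per-feature linear scan over all clusters by one sort of each chromosome's
-- cluster starts plus two binary searches per feature interval (objective: alternative).
-- ===== PORT A =====
def overlap_randomized_clusters_gtf (gtf_dict : List (String × List (String × List Int))) (randomized_clusters : List (String × List (String × List Int))) (upstream_bp : Int) (downstream_bp : Int) (feature_body : Bool) : List Int :=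
  let G := PySem.Dict.ofList gtf_dict
  let R := PySem.Dict.ofList randomized_clusters
  let st :=
    G.keys.foldl (fun (acc : Int × Int × Int) chromosome =>
      if R.contains chromosome then
        (PySem.Dict.ofList (G.getD chromosome [])).keys.foldl (fun acc2 feature_id =>
          let feature_start := PySem.List.pyGetD ((PySem.Dict.ofList (G.getD chromosome [])).getD feature_id []) 0 0
          let feature_stop := PySem.List.pyGetD ((PySem.Dict.ofList (G.getD chromosome [])).getD feature_id []) 1 0
          (PySem.Dict.ofList (R.getD chromosome [])).keys.foldl (fun acc3 cluster =>
            let cluster_start := PySem.List.pyGetD ((PySem.Dict.ofList (R.getD chromosome [])).getD cluster []) 0 0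
            (if upstream_bp > 0 ∧ feature_start - upstream_bp ≤ cluster_start ∧ cluster_start ≤ feature_start then acc3.1 + 1 else acc3.1,
             if feature_body = true ∧ feature_start ≤ cluster_start ∧ cluster_start ≤ feature_stop then acc3.2.1 + 1 else acc3.2.1,
             if downstream_bp > 0 ∧ feature_stop + downstream_bp ≥ cluster_start ∧ cluster_start ≥ feature_stop then acc3.2.2 + 1 else acc3.2.2)) acc2) acc
      else acc) (0, 0, 0)
  [st.1, st.2.1, st.2.2]

-- ===== PORT B =====
-- helper: Source B's _count_in (max(0, bisect_right - bisect_left))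
def pvCountIn (starts : List Int) (lo hi : Int) : Int :=
  max 0 ((PySem.List.bisectRight starts hi : Int) - (PySem.List.bisectLeft starts lo : Int))

def overlap_randomized_clusters_gtf_alt (gtf_dict : List (String × List (String × List Int))) (randomized_clusters : List (String × List (String × List Int))) (upstream_bp : Int) (downstream_bp : Int) (feature_body : Bool) : List Int :=
  let G := PySem.Dict.ofList gtf_dict
  let R := PySem.Dict.ofList randomized_clusters
  let st :=
    G.keys.foldl (fun (acc : Int × Int × Int) chromosome =>
      if R.contains chromosome then
        let starts := PySem.List.sorted ((PySem.Dict.ofList (R.getD chromosome [])).values.map (fun w => PySem.List.pyGetD w 0 0)) (fun x => x) false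
        (PySem.Dict.ofList (G.getD chromosome [])).values.foldl (fun (acc2 : Int × Int × Int) coords =>
          let feature_start := PySem.List.pyGetD coords 0 0
          let feature_stop := PySem.List.pyGetD coords 1 0
          (if upstream_bp > 0 then acc2.1 + pvCountIn starts (feature_start - upstream_bp) feature_start else acc2.1,
           if feature_body = true then acc2.2.1 + pvCountIn starts feature_start feature_stop else acc2.2.1,
           if downstream_bp > 0 then acc2.2.2 + pvCountIn starts feature_stop (feature_stop + downstream_bp) else acc2.2.2)) acc
      else acc) (0, 0, 0)
  [st.1, st.2.1, st.2.2]

-- ===== PRECONDITION & SPEC =====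
-- Pre_ excludes exactly the inputs where Python A raises IndexError: on some chromosome present
-- in both dicts, a feature's coordinate list has fewer than 2 entries, or (some feature exists
-- and) a cluster's coordinate list is empty.
def Pre_overlap_randomized_clusters_gtf (gtf_dict : List (String × List (String × List Int))) (randomized_clusters : List (String × List (String × List Int))) (upstream_bp : Int) (downstream_bp : Int) (feature_body : Bool) : Prop :=
  ∀ c ∈ (PySem.Dict.ofList gtf_dict).keys,
    (PySem.Dict.ofList randomized_clusters).contains c = true →
      (∀ p ∈ (PySem.Dict.ofList ((PySem.Dict.ofList gtf_dict).getD c ([] : List (String × List Int)))).items, 2 ≤ p.2.length) ∧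
      ((PySem.Dict.ofList ((PySem.Dict.ofList gtf_dict).getD c ([] : List (String × List Int)))).items ≠ [] →
        ∀ q ∈ (PySem.Dict.ofList ((PySem.Dict.ofList randomized_clusters).getD c ([] : List (String × List Int)))).items, 1 ≤ q.2.length)
instance (gtf_dict : List (String × List (String × List Int))) (randomized_clusters : List (String × List (String × List Int))) (upstream_bp : Int) (downstream_bp : Int) (feature_body : Bool) : Decidable (Pre_overlap_randomized_clusters_gtf gtf_dict randomized_clusters upstream_bp downstream_bp feature_body) := by unfold Pre_overlap_randomized_clusters_gtf; infer_instance

def pvWitness_overlap_randomized_clusters_gtf : (List (String × List (String × List Int))) × (List (String × List (String × List Int))) × Int × Int × Bool :=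
  ([("c1", [("f1", [1, 5])])], [("c1", [("k1", [3])])], 2, 2, true)

def Spec_overlap_randomized_clusters_gtf (gtf_dict : List (String × List (String × List Int))) (randomized_clusters : List (String × List (String × List Int))) (upstream_bp : Int) (downstream_bp : Int) (feature_body : Bool) (out : List Int) : Prop := out = overlap_randomized_clusters_gtf_alt gtf_dict randomized_clusters upstream_bp downstream_bp feature_body
instance (gtf_dict : List (String × List (String × List Int))) (randomized_clusters : List (String × List (String × List Int))) (upstream_bp : Int) (downstream_bp : Int) (feature_body : Bool) (out : List Int) : Decidable (Spec_overlap_randomized_clusters_gtf gtf_dict randomized_clusters upstream_bp downstream_bp feature_body out) := by unfold Spec_overlap_randomized_clusters_gtf; infer_instance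

-- ===== CLAIM (what is proved, stated in full; the proofs are below) =====
def Claim_equal_overlap_randomized_clusters_gtf : Prop := ∀ (gtf_dict : List (String × List (String × List Int))) (randomized_clusters : List (String × List (String × List Int))) (upstream_bp : Int) (downstream_bp : Int) (feature_body : Bool), Dom_overlap_randomized_clusters_gtf gtf_dict randomized_clusters upstream_bp downstream_bp feature_body → Pre_overlap_randomized_clusters_gtf gtf_dict randomized_clusters upstream_bp downstream_bp feature_body → Spec_overlap_randomized_clusters_gtf gtf_dict randomized_clusters upstream_bp downstream_bp feature_body (overlap_randomized_clusters_gtf gtf_dict randomized_clusters upstream_bp downstream_bp feature_body)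

-- ===== LEMMAS AND PROOFS =====

-- on an ascending list, bisect_left v counts the elements < v
lemma pvBisectLeft_eq_countP (s : List Int) (h : s.Pairwise (· ≤ ·)) (v : Int) :
    (PySem.List.bisectLeft s v : Int) = (s.countP (fun x => decide (x < v)) : Int) := by
  obtain ⟨h1, h2, h3⟩ := PySem.List.bisectLeft_spec s v h
  have key : s.countP (fun x => decide (x < v)) = PySem.List.bisectLeft s v := by
    conv_lhs => rw [← List.take_append_drop (PySem.List.bisectLeft s v) s]
    rw [List.countP_append]
    have ht : (s.take (PySem.List.bisectLeft s v)).countP (fun x => decide (x < v))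
        = (s.take (PySem.List.bisectLeft s v)).length := by
      apply List.countP_eq_length.2
      intro a ha
      obtain ⟨j, hj, hval⟩ := List.mem_take_iff_getElem.1 ha
      simp only [decide_eq_true_eq, ← hval]
      exact h2 j (Nat.lt_of_lt_of_le hj (min_le_right _ _)) (Nat.lt_of_lt_of_le hj (min_le_left _ _))
    have hd : (s.drop (PySem.List.bisectLeft s v)).countP (fun x => decide (x < v)) = 0 := by
      apply List.countP_eq_zero.2
      intro a ha
      obtain ⟨j, hj, hval⟩ := List.mem_drop_iff_getElem.1 ha
      simp only [decide_eq_true_eq, ← hval, not_lt]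
      exact h3 _ (by omega) (by omega)
    rw [ht, hd, List.length_take, Nat.min_eq_left h1]
    omega
  rw [key]

-- on an ascending list, bisect_right v counts the elements ≤ v
lemma pvBisectRight_eq_countP (s : List Int) (h : s.Pairwise (· ≤ ·)) (v : Int) :
    (PySem.List.bisectRight s v : Int) = (s.countP (fun x => decide (x ≤ v)) : Int) := by
  obtain ⟨h1, h2, h3⟩ := PySem.List.bisectRight_spec s v h
  have key : s.countP (fun x => decide (x ≤ v)) = PySem.List.bisectRight s v := by
    conv_lhs => rw [← List.take_append_drop (PySem.List.bisectRight s v) s]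
    rw [List.countP_append]
    have ht : (s.take (PySem.List.bisectRight s v)).countP (fun x => decide (x ≤ v))
        = (s.take (PySem.List.bisectRight s v)).length := by
      apply List.countP_eq_length.2
      intro a ha
      obtain ⟨j, hj, hval⟩ := List.mem_take_iff_getElem.1 ha
      simp only [decide_eq_true_eq, ← hval]
      exact h2 j (Nat.lt_of_lt_of_le hj (min_le_right _ _)) (Nat.lt_of_lt_of_le hj (min_le_left _ _))
    have hd : (s.drop (PySem.List.bisectRight s v)).countP (fun x => decide (x ≤ v)) = 0 := by
      apply List.countP_eq_zero.2
      intro a ha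
      obtain ⟨j, hj, hval⟩ := List.mem_drop_iff_getElem.1 ha
      simp only [decide_eq_true_eq, ← hval, not_le]
      exact h3 _ (by omega) (by omega)
    rw [ht, hd, List.length_take, Nat.min_eq_left h1]
    omega
  rw [key]

lemma pvSub_countP (xs : List Int) (lo hi : Int) (h : lo ≤ hi) :
    (xs.countP (fun x => decide (x ≤ hi)) : Int) - (xs.countP (fun x => decide (x < lo)) : Int)
      = (xs.countP (fun x => decide (lo ≤ x ∧ x ≤ hi)) : Int) := by
  induction xs with
  | nil => simp
  | cons a t ih =>
    simp only [List.countP_cons, decide_eq_true_eq]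
    push_cast
    split_ifs <;> omega

lemma pvMax_sub_countP (xs : List Int) (lo hi : Int) :
    max 0 ((xs.countP (fun x => decide (x ≤ hi)) : Int) - (xs.countP (fun x => decide (x < lo)) : Int))
      = (xs.countP (fun x => decide (lo ≤ x ∧ x ≤ hi)) : Int) := by
  by_cases h : lo ≤ hi
  · rw [pvSub_countP xs lo hi h]; omega
  · have h0 : xs.countP (fun x => decide (lo ≤ x ∧ x ≤ hi)) = 0 :=
      List.countP_eq_zero.2 (by intro a _; simp; omega)
    have hm : xs.countP (fun x => decide (x ≤ hi)) ≤ xs.countP (fun x => decide (x < lo)) :=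
      List.countP_mono_left (by intro a _ ha; simp_all; omega)
    rw [h0]; push_cast; omega

lemma pvCountIn_sorted (xs : List Int) (lo hi : Int) :
    pvCountIn (PySem.List.sorted xs (fun x => x) false) lo hi
      = (xs.countP (fun x => decide (lo ≤ x ∧ x ≤ hi)) : Int) := by
  have hp : (PySem.List.sorted xs (fun x => x) false).Pairwise (· ≤ ·) :=
    PySem.List.sorted_pairwise xs (fun x => x)
  have hperm := PySem.List.sorted_perm xs (fun x => x) false
  unfold pvCountIn
  rw [pvBisectRight_eq_countP _ hp hi, pvBisectLeft_eq_countP _ hp lo,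
      hperm.countP_eq, hperm.countP_eq, pvMax_sub_countP]

lemma pvComp (cond : Prop) [Decidable cond] (P : Int → Prop) [DecidablePred P] (raw : List Int) (lo hi a : Int)
    (hP : ∀ x, P x ↔ (cond ∧ lo ≤ x ∧ x ≤ hi)) :
    a + (raw.countP (fun x => decide (P x)) : Int)
      = if cond then a + pvCountIn (PySem.List.sorted raw (fun x => x) false) lo hi else a := by
  by_cases h : cond
  · rw [if_pos h, pvCountIn_sorted raw lo hi]
    congr 2
    apply List.countP_congr
    intro x _
    simp [hP x, h]
  · rw [if_neg h]
    have h0 : raw.countP (fun x => decide (P x)) = 0 :=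
      List.countP_eq_zero.2 (by intro x _; simp [hP x]; intro hc; exact absurd hc h)
    rw [h0]; simp

lemma pvClusterLoop (u d : Int) (fb : Bool) (fs fe : Int) (cl : List (String × List Int)) (acc : Int × Int × Int) :
    (PySem.Dict.ofList cl).keys.foldl (fun (acc3 : Int × Int × Int) cluster =>
        ((if u > 0 ∧ fs - u ≤ PySem.List.pyGetD ((PySem.Dict.ofList cl).getD cluster []) 0 0 ∧ PySem.List.pyGetD ((PySem.Dict.ofList cl).getD cluster []) 0 0 ≤ fs then acc3.1 + 1 else acc3.1),
         (if fb = true ∧ fs ≤ PySem.List.pyGetD ((PySem.Dict.ofList cl).getD cluster []) 0 0 ∧ PySem.List.pyGetD ((PySem.Dict.ofList cl).getD cluster []) 0 0 ≤ fe then acc3.2.1 + 1 else acc3.2.1),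
         (if d > 0 ∧ fe + d ≥ PySem.List.pyGetD ((PySem.Dict.ofList cl).getD cluster []) 0 0 ∧ PySem.List.pyGetD ((PySem.Dict.ofList cl).getD cluster []) 0 0 ≥ fe then acc3.2.2 + 1 else acc3.2.2))) acc
    = (acc.1 + (((PySem.Dict.ofList cl).values.map (fun w => PySem.List.pyGetD w 0 0)).countP (fun x => decide (u > 0 ∧ fs - u ≤ x ∧ x ≤ fs)) : Int),
       acc.2.1 + (((PySem.Dict.ofList cl).values.map (fun w => PySem.List.pyGetD w 0 0)).countP (fun x => decide (fb = true ∧ fs ≤ x ∧ x ≤ fe)) : Int),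
       acc.2.2 + (((PySem.Dict.ofList cl).values.map (fun w => PySem.List.pyGetD w 0 0)).countP (fun x => decide (d > 0 ∧ fe + d ≥ x ∧ x ≥ fe)) : Int)) := by
  obtain ⟨a, b, c⟩ := acc
  rw [show (PySem.Dict.ofList cl).keys = (PySem.Dict.ofList cl).items.map (fun p => p.1) from rfl]
  rw [List.foldl_map]
  rw [PySem.List.foldl_congr_mem _ _ (fun (acc3 : Int × Int × Int) (p : String × List Int) =>
        ((if u > 0 ∧ fs - u ≤ PySem.List.pyGetD p.2 0 0 ∧ PySem.List.pyGetD p.2 0 0 ≤ fs then acc3.1 + 1 else acc3.1),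
         (if fb = true ∧ fs ≤ PySem.List.pyGetD p.2 0 0 ∧ PySem.List.pyGetD p.2 0 0 ≤ fe then acc3.2.1 + 1 else acc3.2.1),
         (if d > 0 ∧ fe + d ≥ PySem.List.pyGetD p.2 0 0 ∧ PySem.List.pyGetD p.2 0 0 ≥ fe then acc3.2.2 + 1 else acc3.2.2))) _
      (by
        intro acc3 p hp
        obtain ⟨k, v⟩ := p
        rw [PySem.Dict.getD_of_mem_items _ hp (PySem.Dict.nodup_keys_ofList cl)])]
  rw [show ((PySem.Dict.ofList cl).values.map (fun w => PySem.List.pyGetD w 0 0))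
        = (PySem.Dict.ofList cl).items.map (fun p => PySem.List.pyGetD p.2 0 0) from by
      simp [PySem.Dict.values, List.map_map, Function.comp]]
  rw [← List.foldl_map (f := fun (p : String × List Int) => PySem.List.pyGetD p.2 0 0)
      (g := fun (acc3 : Int × Int × Int) (x : Int) =>
        ((if u > 0 ∧ fs - u ≤ x ∧ x ≤ fs then acc3.1 + 1 else acc3.1),
         (if fb = true ∧ fs ≤ x ∧ x ≤ fe then acc3.2.1 + 1 else acc3.2.1),
         (if d > 0 ∧ fe + d ≥ x ∧ x ≥ fe then acc3.2.2 + 1 else acc3.2.2)))]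
  rw [PySem.List.foldl_prod_mk (f := fun (a : Int) (x : Int) => if u > 0 ∧ fs - u ≤ x ∧ x ≤ fs then a + 1 else a)
      (g := fun (s : Int × Int) (x : Int) => ((if fb = true ∧ fs ≤ x ∧ x ≤ fe then s.1 + 1 else s.1),
          (if d > 0 ∧ fe + d ≥ x ∧ x ≥ fe then s.2 + 1 else s.2)))]
  rw [PySem.List.foldl_prod_mk (f := fun (a : Int) (x : Int) => if fb = true ∧ fs ≤ x ∧ x ≤ fe then a + 1 else a)
      (g := fun (a : Int) (x : Int) => if d > 0 ∧ fe + d ≥ x ∧ x ≥ fe then a + 1 else a)]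
  rw [PySem.List.foldl_ite_add_one, PySem.List.foldl_ite_add_one, PySem.List.foldl_ite_add_one]

lemma pvInner (u d : Int) (fb : Bool) (fl cl : List (String × List Int)) (acc : Int × Int × Int) :
    List.foldl
      (fun acc2 feature_id =>
        List.foldl
          (fun (acc3 : Int × Int × Int) cluster =>
            (if u > 0 ∧ PySem.List.pyGetD ((PySem.Dict.ofList fl).getD feature_id []) 0 0 - u ≤ PySem.List.pyGetD ((PySem.Dict.ofList cl).getD cluster []) 0 0 ∧ PySem.List.pyGetD ((PySem.Dict.ofList cl).getD cluster []) 0 0 ≤ PySem.List.pyGetD ((PySem.Dict.ofList fl).getD feature_id []) 0 0 then acc3.1 + 1 else acc3.1,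
             if fb = true ∧ PySem.List.pyGetD ((PySem.Dict.ofList fl).getD feature_id []) 0 0 ≤ PySem.List.pyGetD ((PySem.Dict.ofList cl).getD cluster []) 0 0 ∧ PySem.List.pyGetD ((PySem.Dict.ofList cl).getD cluster []) 0 0 ≤ PySem.List.pyGetD ((PySem.Dict.ofList fl).getD feature_id []) 1 0 then acc3.2.1 + 1 else acc3.2.1,
             if d > 0 ∧ PySem.List.pyGetD ((PySem.Dict.ofList fl).getD feature_id []) 1 0 + d ≥ PySem.List.pyGetD ((PySem.Dict.ofList cl).getD cluster []) 0 0 ∧ PySem.List.pyGetD ((PySem.Dict.ofList cl).getD cluster []) 0 0 ≥ PySem.List.pyGetD ((PySem.Dict.ofList fl).getD feature_id []) 1 0 then acc3.2.2 + 1 else acc3.2.2))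
          acc2 (PySem.Dict.ofList cl).keys)
      acc (PySem.Dict.ofList fl).keys
    =
    List.foldl
      (fun (acc2 : Int × Int × Int) coords =>
        (if u > 0 then acc2.1 + pvCountIn (PySem.List.sorted ((PySem.Dict.ofList cl).values.map (fun w => PySem.List.pyGetD w 0 0)) (fun x => x) false) (PySem.List.pyGetD coords 0 0 - u) (PySem.List.pyGetD coords 0 0) else acc2.1,
         if fb = true then acc2.2.1 + pvCountIn (PySem.List.sorted ((PySem.Dict.ofList cl).values.map (fun w => PySem.List.pyGetD w 0 0)) (fun x => x) false) (PySem.List.pyGetD coords 0 0) (PySem.List.pyGetD coords 1 0) else acc2.2.1,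
         if d > 0 then acc2.2.2 + pvCountIn (PySem.List.sorted ((PySem.Dict.ofList cl).values.map (fun w => PySem.List.pyGetD w 0 0)) (fun x => x) false) (PySem.List.pyGetD coords 1 0) (PySem.List.pyGetD coords 1 0 + d) else acc2.2.2))
      acc (PySem.Dict.ofList fl).values := by
  rw [show (PySem.Dict.ofList fl).keys = (PySem.Dict.ofList fl).items.map (fun p => p.1) from rfl,
      show (PySem.Dict.ofList fl).values = (PySem.Dict.ofList fl).items.map (fun p => p.2) from rfl,
      List.foldl_map, List.foldl_map]
  apply PySem.List.foldl_congr_mem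
  intro acc2 p hp
  obtain ⟨k, v⟩ := p
  rw [PySem.Dict.getD_of_mem_items _ hp (PySem.Dict.nodup_keys_ofList fl)]
  rw [pvClusterLoop u d fb (PySem.List.pyGetD v 0 0) (PySem.List.pyGetD v 1 0) cl acc2]
  refine Prod.ext ?_ (Prod.ext ?_ ?_)
  · exact pvComp (u > 0) _ _ _ _ _ (fun x => Iff.rfl)
  · exact pvComp (fb = true) _ _ _ _ _ (fun x => Iff.rfl)
  · exact pvComp (d > 0) _ _ _ _ _
      (fun x => ⟨fun ⟨h1, h2, h3⟩ => ⟨h1, h3, h2⟩, fun ⟨h1, h2, h3⟩ => ⟨h1, h3, h2⟩⟩)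

-- the central per-input equality of the two ports (no precondition needed: both ports are total)
lemma pvPorts_eq (gtf_dict : List (String × List (String × List Int))) (randomized_clusters : List (String × List (String × List Int))) (upstream_bp : Int) (downstream_bp : Int) (feature_body : Bool) :
    overlap_randomized_clusters_gtf gtf_dict randomized_clusters upstream_bp downstream_bp feature_body
      = overlap_randomized_clusters_gtf_alt gtf_dict randomized_clusters upstream_bp downstream_bp feature_body := by
  unfold overlap_randomized_clusters_gtf overlap_randomized_clusters_gtf_alt
  simp only []
  apply congrArg (fun (st : Int × Int × Int) => [st.1, st.2.1, st.2.2])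
  apply PySem.List.foldl_congr_mem
  intro acc chrom hmem
  by_cases hc : (PySem.Dict.ofList randomized_clusters).contains chrom
  · rw [if_pos hc, if_pos hc]
    exact pvInner upstream_bp downstream_bp feature_body _ _ acc
  · rw [if_neg hc, if_neg hc]

-- ===== VERDICT (by name: the statement is the Claim_ definition above) =====
theorem overlap_randomized_clusters_gtf_spec : Claim_equal_overlap_randomized_clusters_gtf := by
  intro g r u d fb _ _
  unfold Spec_overlap_randomized_clusters_gtf
  exact pvPorts_eq g r u d fb
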